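-- pv_equiv track=rewrite | github.com/Mart0shka/ALG_vk | src/sem4_binary_tree/find_max_times_min/max_min_multiplication.py | max_min_multiplication
-- ===== SOURCE A (Python) =====
-- def max_min_multiplication(data):
--     if len(data)<3:
--         return -1
--
--     min_index = 1
--     max_index = 2
--
--     i = 1
--     while i < len(data):
--         min_index = i
--         i = 2 * i + 1
--
--     i = 2
--     while i < len(data):
--         max_index = i
--         i = 2 * i + 2
--
--     return data[min_index] * data[max_index]
-- ===== SOURCE B (Python) =====
-- def max_min_multiplication(data):
--     if len(data) < 3:
--         return -1
--     n = len(data)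
--     # deepest left-chain index 2^k - 1 < n, in closed form
--     min_index = (1 << (n.bit_length() - 1)) - 1
--     # deepest right-chain index 2^(k+1) - 2 < n, in closed form
--     max_index = (1 << ((n + 1).bit_length() - 1)) - 2
--     return data[min_index] * data[max_index]
-- ===== Notes on version B (the rewrite author's own statement) =====
-- stated objective: simpler
-- what changed: Replaces both while-loops that walk the left/right chains with closed-form index formulas using bit_length (min_index = 2^(bit_length(n)-1)-1, max_index = 2^(bit_length(n+1)-1)-2).
import Mathlib
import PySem

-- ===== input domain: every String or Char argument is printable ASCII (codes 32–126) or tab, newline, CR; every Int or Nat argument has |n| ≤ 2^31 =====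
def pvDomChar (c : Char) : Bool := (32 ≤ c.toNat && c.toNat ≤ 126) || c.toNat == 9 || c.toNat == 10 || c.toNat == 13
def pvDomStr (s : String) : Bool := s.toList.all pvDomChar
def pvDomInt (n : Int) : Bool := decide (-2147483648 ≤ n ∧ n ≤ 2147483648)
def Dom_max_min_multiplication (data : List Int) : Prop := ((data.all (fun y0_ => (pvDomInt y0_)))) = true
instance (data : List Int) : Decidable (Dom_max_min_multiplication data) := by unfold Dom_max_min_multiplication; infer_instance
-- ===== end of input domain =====

-- B replaces A's two index-walking while-loops with closed-form bit_length formulas (objective: simpler).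

-- ===== PORT A =====
-- 'while i < n: min_index = i; i = 2*i+1' (i, min_index ≥ 1 throughout, so Nat state is exact)
def pvLoopMin (n minIdx i : Nat) : Nat :=
  if i < n then pvLoopMin n i (2 * i + 1) else minIdx
termination_by n - i
decreasing_by omega

-- 'while i < n: max_index = i; i = 2*i+2'
def pvLoopMax (n maxIdx i : Nat) : Nat :=
  if i < n then pvLoopMax n i (2 * i + 2) else maxIdx
termination_by n - i
decreasing_by omega

def max_min_multiplication (data : List Int) : Int :=
  if data.length < 3 then -1
  else
    let min_index := pvLoopMin data.length 1 1
    let max_index := pvLoopMax data.length 2 2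
    -- both indices are provably < len, so getD 0 is never taken; Python never raises here
    ((PySem.List.pyGet? data (min_index : Int)).getD 0) *
    ((PySem.List.pyGet? data (max_index : Int)).getD 0)

-- ===== PORT B =====
-- n.bit_length() - 1 = Nat.log 2 n for n > 0
def max_min_multiplication_alt (data : List Int) : Int :=
  if data.length < 3 then -1
  else
    let n := data.length
    let min_index : Nat := 2 ^ (Nat.log 2 n) - 1
    let max_index : Nat := 2 ^ (Nat.log 2 (n + 1)) - 2
    ((PySem.List.pyGet? data (min_index : Int)).getD 0) *
    ((PySem.List.pyGet? data (max_index : Int)).getD 0)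

-- ===== PRECONDITION & SPEC =====
def Spec_max_min_multiplication (data : List Int) (out : Int) : Prop := out = max_min_multiplication_alt data
instance (data : List Int) (out : Int) : Decidable (Spec_max_min_multiplication data out) := by unfold Spec_max_min_multiplication; infer_instance

-- ===== CLAIM (what is proved, stated in full; the proofs are below) =====
def Claim_equal_max_min_multiplication : Prop := ∀ (data : List Int), Dom_max_min_multiplication data → Spec_max_min_multiplication data (max_min_multiplication data)

-- ===== LEMMAS AND PROOFS =====

theorem pvLoopMin_pow (n : Nat) : ∀ (d k m : Nat), 0 < k → 2 ^ k ≤ n → n < 2 ^ (k + d + 1) →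
    pvLoopMin n m (2 ^ k - 1) = 2 ^ (Nat.log 2 n) - 1 := by
  intro d
  induction d with
  | zero =>
    intro k m hk hle hlt
    simp only [Nat.add_zero] at hlt
    have hp1 : 1 ≤ 2 ^ k := Nat.one_le_two_pow
    have hpow : 2 ^ (k + 1) = 2 * 2 ^ k := by ring
    have hlog : Nat.log 2 n = k := Nat.log_eq_of_pow_le_of_lt_pow hle hlt
    have h1 : 2 ^ k - 1 < n := by omega
    have h2 : ¬ (2 * (2 ^ k - 1) + 1 < n) := by omega
    rw [pvLoopMin, if_pos h1, pvLoopMin, if_neg h2, hlog]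
  | succ d ih =>
    intro k m hk hle hlt
    have hp1 : 1 ≤ 2 ^ k := Nat.one_le_two_pow
    have hpow : 2 ^ (k + 1) = 2 * 2 ^ k := by ring
    by_cases hc : n < 2 ^ (k + 1)
    · have hlog : Nat.log 2 n = k := Nat.log_eq_of_pow_le_of_lt_pow hle hc
      have h1 : 2 ^ k - 1 < n := by omega
      have h2 : ¬ (2 * (2 ^ k - 1) + 1 < n) := by omega
      rw [pvLoopMin, if_pos h1, pvLoopMin, if_neg h2, hlog]
    · have hle' : 2 ^ (k + 1) ≤ n := by omega
      have h1 : 2 ^ k - 1 < n := by omega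
      have hstep : 2 * (2 ^ k - 1) + 1 = 2 ^ (k + 1) - 1 := by omega
      rw [pvLoopMin, if_pos h1, hstep]
      exact ih (k + 1) _ (by omega) hle' (by
        have : k + 1 + d + 1 = k + (d + 1) + 1 := by ring
        rw [this]; exact hlt)

theorem pvLoopMax_pow (n : Nat) : ∀ (d k m : Nat), 2 ≤ k → 2 ^ k ≤ n + 1 → n + 1 < 2 ^ (k + d + 1) →
    pvLoopMax n m (2 ^ k - 2) = 2 ^ (Nat.log 2 (n + 1)) - 2 := by
  intro d
  induction d with
  | zero =>
    intro k m hk hle hlt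
    simp only [Nat.add_zero] at hlt
    have hlog : Nat.log 2 (n + 1) = k := Nat.log_eq_of_pow_le_of_lt_pow hle hlt
    have hk4 : 4 ≤ 2 ^ k := by calc 4 = 2 ^ 2 := by norm_num
                                    _ ≤ 2 ^ k := Nat.pow_le_pow_right (by norm_num) hk
    have hpow : 2 ^ (k + 1) = 2 * 2 ^ k := by ring
    have h1 : 2 ^ k - 2 < n := by omega
    have h2 : ¬ (2 * (2 ^ k - 2) + 2 < n) := by omega
    rw [pvLoopMax, if_pos h1, pvLoopMax, if_neg h2, hlog]
  | succ d ih =>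
    intro k m hk hle hlt
    have hk4 : 4 ≤ 2 ^ k := by calc 4 = 2 ^ 2 := by norm_num
                                    _ ≤ 2 ^ k := Nat.pow_le_pow_right (by norm_num) hk
    have hpow : 2 ^ (k + 1) = 2 * 2 ^ k := by ring
    by_cases hc : n + 1 < 2 ^ (k + 1)
    · have hlog : Nat.log 2 (n + 1) = k := Nat.log_eq_of_pow_le_of_lt_pow hle hc
      have h1 : 2 ^ k - 2 < n := by omega
      have h2 : ¬ (2 * (2 ^ k - 2) + 2 < n) := by omega
      rw [pvLoopMax, if_pos h1, pvLoopMax, if_neg h2, hlog]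
    · have hle' : 2 ^ (k + 1) ≤ n + 1 := by omega
      have h1 : 2 ^ k - 2 < n := by omega
      have hstep : 2 * (2 ^ k - 2) + 2 = 2 ^ (k + 1) - 2 := by omega
      rw [pvLoopMax, if_pos h1, hstep]
      exact ih (k + 1) _ (by omega) hle' (by
        have : k + 1 + d + 1 = k + (d + 1) + 1 := by ring
        rw [this]; exact hlt)

theorem pvLoopMin_eq (n : Nat) (h : 3 ≤ n) : pvLoopMin n 1 1 = 2 ^ (Nat.log 2 n) - 1 := by
  have h2 : (2:Nat) ^ 1 ≤ n := by omega
  have hlog1 : 1 ≤ Nat.log 2 n := (Nat.le_log_iff_pow_le (by norm_num) (by omega)).mpr h2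
  have hlt : n < 2 ^ (Nat.log 2 n + 1) := Nat.lt_pow_succ_log_self (by norm_num) n
  have := pvLoopMin_pow n (Nat.log 2 n - 1) 1 1 (by norm_num) h2
    (by have : 1 + (Nat.log 2 n - 1) + 1 = Nat.log 2 n + 1 := by omega
        rw [this]; exact hlt)
  simpa using this

theorem pvLoopMax_eq (n : Nat) (h : 3 ≤ n) : pvLoopMax n 2 2 = 2 ^ (Nat.log 2 (n + 1)) - 2 := by
  have h2 : (2:Nat) ^ 2 ≤ n + 1 := by omega
  have hlog2 : 2 ≤ Nat.log 2 (n + 1) := (Nat.le_log_iff_pow_le (by norm_num) (by omega)).mpr h2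
  have hlt : n + 1 < 2 ^ (Nat.log 2 (n + 1) + 1) := Nat.lt_pow_succ_log_self (by norm_num) (n + 1)
  have := pvLoopMax_pow n (Nat.log 2 (n + 1) - 2) 2 2 (by norm_num) h2
    (by have : 2 + (Nat.log 2 (n + 1) - 2) + 1 = Nat.log 2 (n + 1) + 1 := by omega
        rw [this]; exact hlt)
  simpa using this

-- ===== VERDICT (by name: the statement is the Claim_ definition above) =====
theorem max_min_multiplication_spec : Claim_equal_max_min_multiplication := by
  intro data _
  unfold Spec_max_min_multiplication max_min_multiplication max_min_multiplication_alt
  by_cases h : data.length < 3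
  · simp [h]
  · have h3 : 3 ≤ data.length := by omega
    simp only [if_neg h, pvLoopMin_eq data.length h3, pvLoopMax_eq data.length h3]
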